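-- pv_equiv track=rewrite | github.com/SumaniqueCode/PYTHON | 17_String_programs.py | countMatchingCharacter
-- ===== SOURCE A (Python) =====
-- def countMatchingCharacter(str1, str2):
--     new_str1 = str1.lower()
--     new_str2 = str2.lower()
--
--     count = 0
--     for i in range(len(new_str1)):
--         for j in range (len(new_str2)):
--             if(new_str1[i]==new_str2[j]):
--                 count = count+1
--                 break
--
--     # Another method
--     #coverting to set so that dublicates are removed i.e set  contains only unique characters
--     # new_str1 = set(str1.lower())
--     # new_str2 = set(str2.lower())
--     # matched  = new_str1 & new_str2
--     # count = len (matched)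
--     return count
-- ===== SOURCE B (Python) =====
-- from collections import Counter
--
-- def countMatchingCharacter(str1, str2):
--     freq = Counter(str1.lower())
--     chars2 = set(str2.lower())
--     return sum(n for ch, n in freq.items() if ch in chars2)
-- ===== Notes on version B (the rewrite author's own statement) =====
-- stated objective: faster
-- what changed: Replaces the per-character nested scan with a Counter frequency table of str1 and a membership set of str2, summing the counts of the distinct characters present in the set.
import Mathlib
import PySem

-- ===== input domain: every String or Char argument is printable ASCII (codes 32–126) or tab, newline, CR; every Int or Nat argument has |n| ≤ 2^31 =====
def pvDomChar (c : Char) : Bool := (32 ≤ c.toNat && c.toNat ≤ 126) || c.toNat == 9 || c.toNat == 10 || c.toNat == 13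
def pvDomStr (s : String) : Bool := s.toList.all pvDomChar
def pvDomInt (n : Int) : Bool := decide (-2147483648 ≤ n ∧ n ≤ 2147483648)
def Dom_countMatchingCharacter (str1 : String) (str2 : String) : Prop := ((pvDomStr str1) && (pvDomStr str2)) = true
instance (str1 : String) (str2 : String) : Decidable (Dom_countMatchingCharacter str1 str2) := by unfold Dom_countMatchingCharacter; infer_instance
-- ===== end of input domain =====

-- B replaces A's quadratic nested scan by a Counter of str1.lower() plus a set of str2.lower().

-- ===== PORT A =====
-- inner 'for j' loop: scans str2's chars left to right, adds 1 and breaks on the first match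
def pvInnerA (c : Char) (l2 : List Char) (count : Int) : Int :=
  match l2 with
  | [] => count
  | d :: rest => if c == d then count + 1 else pvInnerA c rest count

def countMatchingCharacter (str1 : String) (str2 : String) : Int :=
  let new_str1 := PySem.Str.lower str1
  let new_str2 := PySem.Str.lower str2
  new_str1.toList.foldl (fun count c => pvInnerA c new_str2.toList count) 0

-- ===== PORT B =====
def countMatchingCharacter_alt (str1 : String) (str2 : String) : Int :=
  let freq := PySem.Dict.counter (PySem.Str.lower str1).toList
  let chars2 : PySem.Set Char := PySem.Set.ofList (PySem.Str.lower str2).toList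
  ((freq.items.filter (fun p => chars2.contains p.1)).map Prod.snd).sum

-- ===== PRECONDITION & SPEC =====
def Spec_countMatchingCharacter (str1 : String) (str2 : String) (out : Int) : Prop := out = countMatchingCharacter_alt str1 str2
instance (str1 : String) (str2 : String) (out : Int) : Decidable (Spec_countMatchingCharacter str1 str2 out) := by unfold Spec_countMatchingCharacter; infer_instance

-- ===== CLAIM (what is proved, stated in full; the proofs are below) =====
def Claim_equal_countMatchingCharacter : Prop := ∀ (str1 : String) (str2 : String), Dom_countMatchingCharacter str1 str2 → Spec_countMatchingCharacter str1 str2 (countMatchingCharacter str1 str2)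

-- ===== LEMMAS AND PROOFS =====

-- A's inner loop adds 1 exactly when the character occurs in str2
lemma pvInnerA_eq (c : Char) (l2 : List Char) (count : Int) :
    pvInnerA c l2 count = count + (if l2.contains c then 1 else 0) := by
  induction l2 with
  | nil => simp [pvInnerA]
  | cons d rest ih =>
    simp only [pvInnerA]
    by_cases h : c == d
    · have := eq_of_beq h; subst this; simp
    · have hne : c ≠ d := fun he => h (by simp [he])
      simp [h, ih, List.mem_cons, hne]

-- A's double loop counts the characters of l1 that occur in l2
lemma portA_eq_countP (l1 l2 : List Char) :
    l1.foldl (fun count c => pvInnerA c l2 count) 0 = (l1.countP (fun c => l2.contains c) : Int) := by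
  have h : ∀ (l1 : List Char) (a : Int),
      l1.foldl (fun count c => pvInnerA c l2 count) a
        = a + (l1.countP (fun c => l2.contains c) : Int) := by
    intro l1
    induction l1 with
    | nil => intro a; simp
    | cons x xs ih =>
      intro a
      rw [List.foldl_cons, ih, pvInnerA_eq, List.countP_cons]
      by_cases h : x ∈ l2 <;> simp [h] <;> ring
  simpa using h l1 0

-- prepending x to the counted list raises the if-weighted sum by (if q x then 1 else 0)
lemma pvSum_cons_count (q : Char → Bool) (x : Char) (xs : List Char) :
    ∀ (d : List Char), d.Nodup → x ∈ d →
      (d.map (fun k => if q k then ((x :: xs).count k : Int) else 0)).sum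
        = (d.map (fun k => if q k then (xs.count k : Int) else 0)).sum
          + (if q x then 1 else 0) := by
  intro d
  induction d with
  | nil => intro _ hx; simp at hx
  | cons a t iht =>
    intro hnd hx
    rcases List.mem_cons.mp hx with h | h
    · subst h
      have hnotin : x ∉ t := (List.nodup_cons.mp hnd).1
      have hmap : (t.map (fun k => if q k then ((x :: xs).count k : Int) else 0))
          = (t.map (fun k => if q k then (xs.count k : Int) else 0)) := by
        apply List.map_congr_left
        intro k hk
        have hkx : k ≠ x := fun he => hnotin (he ▸ hk)
        rw [List.count_cons_of_ne (Ne.symm hkx)]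
      simp only [List.map_cons, List.sum_cons, hmap]
      rw [List.count_cons_self]
      by_cases hq : q x <;> simp [hq] <;> push_cast <;> ring
    · have hax : a ≠ x := fun he => (List.nodup_cons.mp hnd).1 (he ▸ h)
      rw [List.map_cons, List.map_cons, List.sum_cons, List.sum_cons,
          iht (List.nodup_cons.mp hnd).2 h, List.count_cons_of_ne (Ne.symm hax)]
      ring

-- summing an if-weighted count over a nodup list covering xs recovers countP
lemma pvSum_count_eq_countP (q : Char → Bool) (xs : List Char) (d : List Char)
    (hnd : d.Nodup) (hsub : ∀ x ∈ xs, x ∈ d) :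
    (d.map (fun k => if q k then (xs.count k : Int) else 0)).sum = (xs.countP q : Int) := by
  induction xs with
  | nil => simp
  | cons x xs ih =>
    have hsub' : ∀ y ∈ xs, y ∈ d := fun y hy => hsub y (List.mem_cons_of_mem _ hy)
    have hx : x ∈ d := hsub x (List.mem_cons_self)
    rw [pvSum_cons_count q x xs d hnd hx, ih hsub', List.countP_cons]
    by_cases hq : q x <;> simp [hq]

-- B's filtered item sum over Counter's items, rewritten as an if-weighted sum
lemma pvFilterMapSum (d : List Char) (q : Char → Bool) (c : Char → Int) :
    (((d.map (fun k => (k, c k))).filter (fun p => q p.1)).map Prod.snd).sum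
      = (d.map (fun k => if q k then c k else 0)).sum := by
  induction d with
  | nil => simp
  | cons a t ih =>
    by_cases hq : q a <;> simp [hq, ih]

-- ===== VERDICT (by name: the statement is the Claim_ definition above) =====
theorem countMatchingCharacter_spec : Claim_equal_countMatchingCharacter := by
  intro str1 str2 _
  unfold Spec_countMatchingCharacter countMatchingCharacter countMatchingCharacter_alt
  simp only [PySem.Dict.items_counter]
  rw [portA_eq_countP,
      pvFilterMapSum (PySem.Set.ofList (PySem.Str.lower str1).toList)
        (fun k => PySem.Set.contains (PySem.Set.ofList (PySem.Str.lower str2).toList) k)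
        (fun k => ((PySem.Str.lower str1).toList.count k : Int)),
      pvSum_count_eq_countP
        (fun k => PySem.Set.contains (PySem.Set.ofList (PySem.Str.lower str2).toList) k)
        (PySem.Str.lower str1).toList (PySem.Set.ofList (PySem.Str.lower str1).toList)
        (PySem.Set.nodup_ofList _) (fun x hx => (PySem.Set.mem_ofList _ _).mpr hx)]
  congr 1
  apply List.countP_congr
  intro c _
  simp [PySem.Set.contains, PySem.Set.mem_ofList]
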